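-- pv_equiv track=rewrite | github.com/KennyKang-git/zspin | verify_scripts/zs_f11_verify_v1_0.py | involutions_on_set
-- ===== SOURCE A (Python) =====
-- def involutions_on_set(elements):
--     """Yield every involution on a given subset (returned as dict src->dst)."""
--     if not elements:
--         yield {}
--         return
--     if len(elements) == 1:
--         yield {elements[0]: elements[0]}
--         return
--     first = elements[0]
--     rest = elements[1:]
--     # Option A: first is fixed
--     for sub in involutions_on_set(rest):
--         out = dict(sub)
--         out[first] = first
--         yield out
--     # Option B: first is paired with some k in rest
--     for k in rest:
--         rest2 = [m for m in rest if m != k]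
--         for sub in involutions_on_set(rest2):
--             out = dict(sub)
--             out[first] = k
--             out[k] = first
--             yield out
-- ===== SOURCE B (Python) =====
-- def involutions_on_set(elements):
--     """Yield every involution on a given subset (returned as dict src->dst).
--
--     Iterative depth-first search with an explicit stack of frames
--     (remaining elements, pairs fixed so far); no recursion, one dict
--     built per leaf, same branch order as the recursive version.
--     """
--     stack = [(list(elements), [])]
--     while stack:
--         rem, tail = stack.pop()
--         if not rem:
--             yield dict(tail)
--             continue
--         first, rest = rem[0], rem[1:]
--         children = [(rest, [(first, first)] + tail)]
--         for k in rest: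
--             children.append(([m for m in rest if m != k],
--                              [(first, k), (k, first)] + tail))
--         stack.extend(reversed(children))
-- ===== Notes on version B (the rewrite author's own statement) =====
-- stated objective: alternative
-- what changed: A is a recursive generator that copies every partial involution dict at every recursion level; B replaces the recursion by an iterative depth-first search over an explicit stack of (remaining, fixed-pairs) frames, sharing the ancestors' pair list between siblings and building one dict per leaf, in the same branch order.
import Mathlib
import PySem

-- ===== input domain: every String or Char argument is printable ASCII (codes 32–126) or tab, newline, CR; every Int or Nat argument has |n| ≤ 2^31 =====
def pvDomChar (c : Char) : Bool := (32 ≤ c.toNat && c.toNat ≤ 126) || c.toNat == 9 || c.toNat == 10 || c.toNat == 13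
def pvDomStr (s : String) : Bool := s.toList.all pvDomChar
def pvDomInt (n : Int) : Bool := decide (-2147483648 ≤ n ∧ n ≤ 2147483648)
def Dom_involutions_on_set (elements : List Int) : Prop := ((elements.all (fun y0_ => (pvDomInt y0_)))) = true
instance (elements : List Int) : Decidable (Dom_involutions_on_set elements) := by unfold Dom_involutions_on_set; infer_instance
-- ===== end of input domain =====

-- B replaces A's recursive generator (which copies each sub-involution dict at every
-- level) by an iterative depth-first search over an explicit stack of frames,
-- building one dict per leaf in the same branch order.

-- ===== PORT A =====
-- A recurses on sublists, copies each sub-involution dict and adds the entries for `first`.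
def invA_rec (elements : List Int) : List (PySem.Dict Int Int) :=
  match elements with
  | [] => [PySem.Dict.empty]
  | [x] => [PySem.Dict.empty.insert x x]
  | first :: rest =>
      -- Option A: first is fixed
      ((invA_rec rest).map (fun sub => sub.insert first first)) ++
      -- Option B: first is paired with some k in rest
      (rest.flatMap (fun k =>
        (invA_rec (rest.filter (fun m => m ≠ k))).map
          (fun sub => (sub.insert first k).insert k first)))
termination_by elements.length
decreasing_by
  · simp
  · have h1 := List.length_filter_le (fun x => !decide ((x : {x // x ∈ rest}).1 = k)) rest.attach
    simp at h1 ⊢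
    omega

def involutions_on_set (elements : List Int) : List (List (Int × Int)) :=
  (invA_rec elements).map (fun d => d.items)

-- ===== PORT B =====
-- One frame of B's stack: (remaining elements, pairs already fixed by the ancestors).
-- Python's `stack.pop()` / `stack.extend(reversed(children))` on the END of the list is
-- ported as head-pop / prepending `children` in order, which is the same discipline.
-- The while-loop is ported with a fuel counter that merely makes it total; the proof
-- shows (stack weight)-much fuel is never exhausted.
def invB_weight (rem : List Int) : Nat := (rem.length + 1).factorial

def invB_loop (fuel : Nat) (stack : List (List Int × List (Int × Int)))
    (out : List (PySem.Dict Int Int)) : List (PySem.Dict Int Int) :=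
  match fuel, stack with
  | _, [] => out
  | 0, _ => out    -- fuel guard only; unreachable with the fuel supplied below
  | fuel + 1, (rem, tail) :: stack' =>
      match rem with
      | [] => invB_loop fuel stack' (out ++ [PySem.Dict.ofList tail])
      | first :: rest =>
          let children :=
            (rest, (first, first) :: tail) ::
            rest.map (fun k =>
              (rest.filter (fun m => m ≠ k), (first, k) :: (k, first) :: tail))
          invB_loop fuel (children ++ stack') out

def involutions_on_set_alt (elements : List Int) : List (List (Int × Int)) :=
  (invB_loop (invB_weight elements) [(elements, [])] []).map (fun d => d.items)

-- ===== PRECONDITION & SPEC =====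
def Spec_involutions_on_set (elements : List Int) (out : List (List (Int × Int))) : Prop := out = involutions_on_set_alt elements
instance (elements : List Int) (out : List (List (Int × Int))) : Decidable (Spec_involutions_on_set elements out) := by unfold Spec_involutions_on_set; infer_instance

-- ===== CLAIM (what is proved, stated in full; the proofs are below) =====
def Claim_equal_involutions_on_set : Prop := ∀ (elements : List Int), Dom_involutions_on_set elements → Spec_involutions_on_set elements (involutions_on_set elements)

-- ===== LEMMAS AND PROOFS =====

-- The dicts one frame (rem, tail) eventually yields: A's dicts for rem, each updated
-- with the ancestors' pairs.
def frameResult (f : List Int × List (Int × Int)) : List (PySem.Dict Int Int) :=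
  (invA_rec f.1).map (fun d => d.update f.2)

-- Expansion of A's recursion under a trailing update, matching B's child frames.
theorem expandA (first : Int) (rest : List Int) (tail : List (Int × Int)) :
    (invA_rec (first :: rest)).map (fun d => d.update tail) =
      (invA_rec rest).map (fun d => d.update ((first, first) :: tail)) ++
      rest.flatMap (fun k =>
        (invA_rec (rest.filter (fun m => m ≠ k))).map
          (fun d => d.update ((first, k) :: (k, first) :: tail))) := by
  match rest with
  | [] => simp [invA_rec, PySem.Dict.update]
  | x :: xs =>
      rw [invA_rec]
      · rw [List.map_append, List.map_map, List.map_flatMap]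
        congr 1
        apply List.flatMap_congr
        intro k _
        rw [List.map_map]
        exact List.map_congr_left (fun d _ => rfl)
      · simp

theorem weight_pos (rem : List Int) : 1 ≤ invB_weight rem :=
  Nat.one_le_iff_ne_zero.mpr (Nat.factorial_ne_zero _)

theorem weight_children (first : Int) (rest : List Int) :
    invB_weight rest +
      ((rest.map (fun k => invB_weight (rest.filter (fun m => m ≠ k)))).sum) + 1
      ≤ invB_weight (first :: rest) := by
  have hsum : (rest.map (fun k => invB_weight (rest.filter (fun m => m ≠ k)))).sum
      ≤ rest.length * rest.length.factorial := by
    calc (rest.map (fun k => invB_weight (rest.filter (fun m => m ≠ k)))).sum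
        ≤ (rest.map (fun _ => rest.length.factorial)).sum := by
          apply List.sum_le_sum
          intro k hk
          have hlt : (rest.filter (fun m => m ≠ k)).length < rest.length := by
            apply List.length_filter_lt_length_iff_exists.mpr
            exact ⟨k, hk, by simp⟩
          exact Nat.factorial_le (by omega)
      _ = rest.length * rest.length.factorial := by
          rw [List.map_const', List.sum_replicate, smul_eq_mul]
  have e1 : invB_weight (first :: rest) = (rest.length + 2) * invB_weight rest := by
    simp [invB_weight, Nat.factorial_succ]
  have e2 : invB_weight rest = (rest.length + 1) * rest.length.factorial := by
    simp [invB_weight, Nat.factorial_succ]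
  have h3 : 1 ≤ rest.length.factorial :=
    Nat.one_le_iff_ne_zero.mpr (Nat.factorial_ne_zero _)
  nlinarith [hsum, e1, e2, h3]

-- Loop invariant: with enough fuel, the loop drains the stack and appends each
-- frame's result, in order.
theorem invB_loop_eq :
    ∀ (fuel : Nat) (stack : List (List Int × List (Int × Int)))
      (out : List (PySem.Dict Int Int)),
      (stack.map (fun f => invB_weight f.1)).sum ≤ fuel →
      invB_loop fuel stack out = out ++ stack.flatMap frameResult := by
  intro fuel
  induction fuel with
  | zero =>
      intro stack out h
      match stack with
      | [] => simp [invB_loop]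
      | (rem, tail) :: stack' =>
          exfalso
          simp at h
          have := weight_pos rem
          omega
  | succ fuel ih =>
      intro stack out h
      match stack with
      | [] => simp [invB_loop]
      | (rem, tail) :: stack' =>
          match rem with
          | [] =>
              rw [invB_loop, ih]
              · simp [frameResult, invA_rec, PySem.Dict.ofList, PySem.Dict.update]
              · simp at h
                have := weight_pos ([] : List Int)
                omega
          | first :: rest =>
              have hfuel : (((rest, (first, first) :: tail) ::
                  rest.map (fun k =>
                    (rest.filter (fun m => m ≠ k),
                     (first, k) :: (k, first) :: tail)) ++ stack').map
                    (fun f => invB_weight f.1)).sum ≤ fuel := by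
                have hc := weight_children first rest
                simp only [List.map_append, List.map_cons, List.map_map,
                  List.sum_append, List.sum_cons] at h ⊢
                have hcomp : List.map ((fun f => invB_weight f.1) ∘ fun k =>
                    (rest.filter (fun m => m ≠ k),
                     (first, k) :: (k, first) :: tail)) rest
                    = List.map (fun k =>
                        invB_weight (rest.filter (fun m => m ≠ k))) rest := by
                  simp [Function.comp_def]
                rw [hcomp]
                omega
              have key : (((rest, (first, first) :: tail) ::
                  rest.map (fun k =>
                    (rest.filter (fun m => m ≠ k),
                     (first, k) :: (k, first) :: tail))).flatMap frameResult)
                  = frameResult (first :: rest, tail) := by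
                simp only [List.flatMap_cons, List.flatMap_map, frameResult]
                rw [expandA]
              rw [invB_loop, ih _ _ hfuel, List.flatMap_append, key,
                List.flatMap_cons]

-- ===== VERDICT (by name: the statement is the Claim_ definition above) =====
theorem involutions_on_set_spec : Claim_equal_involutions_on_set := by
  intro elements _
  unfold Spec_involutions_on_set involutions_on_set involutions_on_set_alt
  rw [invB_loop_eq (invB_weight elements) [(elements, [])] [] (by simp)]
  simp [frameResult, PySem.Dict.update]
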